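-- pv_equiv track=rewrite | github.com/max-ayres/Quantitative-Research-Virtual-Work-Experience | tasktwo.py | findDate
-- ===== SOURCE A (Python) =====
-- def findDate(month, day, year):
--     find = 0
--     for i in range(year - 2021):
--         find += 12
--     for i in range(month):
--         find += 1
--     if year == 2020:
--         if month == 10:
--             return 0
--         elif month == 11:
--             return 1
--         else:
--             return 2
--     return find + 2
-- ===== SOURCE B (Python) =====
-- def findDate(month, day, year):
--     if year == 2020:
--         if month == 10:
--             return 0
--         elif month == 11:
--             return 1
--         else:
--             return 2
--     return 12 * max(0, year - 2021) + max(0, month) + 2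
-- ===== Notes on version B (the rewrite author's own statement) =====
-- stated objective: simpler
-- what changed: Replaced the two accumulation loops with the closed-form 12*max(0, year-2021) + max(0, month) + 2 (max mirrors that range of a negative count is empty), keeping the year==2020 branch.
import Mathlib
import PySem

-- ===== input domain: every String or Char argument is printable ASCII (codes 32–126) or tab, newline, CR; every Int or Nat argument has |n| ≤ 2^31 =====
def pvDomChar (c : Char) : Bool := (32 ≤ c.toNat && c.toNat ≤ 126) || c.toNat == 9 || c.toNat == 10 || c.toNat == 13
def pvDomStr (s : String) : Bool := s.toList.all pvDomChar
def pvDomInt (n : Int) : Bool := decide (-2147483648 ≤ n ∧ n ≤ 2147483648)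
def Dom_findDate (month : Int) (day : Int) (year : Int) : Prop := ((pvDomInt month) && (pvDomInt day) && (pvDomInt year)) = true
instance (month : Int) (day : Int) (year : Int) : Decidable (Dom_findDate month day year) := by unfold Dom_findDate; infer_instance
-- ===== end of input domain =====

-- B replaces the two accumulation loops with the closed form 12*max(0, year-2021) + max(0, month) + 2 (simpler, O(1)).

-- ===== PORT A =====
def findDate (month : Int) (day : Int) (year : Int) : Int :=
  let find : Int := 0
  let find := (PySem.List.pyRange 0 (year - 2021) 1).foldl (fun acc _ => acc + 12) find
  let find := (PySem.List.pyRange 0 month 1).foldl (fun acc _ => acc + 1) find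
  if year == 2020 then
    if month == 10 then 0
    else if month == 11 then 1
    else 2
  else find + 2

-- ===== PORT B =====
def findDate_alt (month : Int) (day : Int) (year : Int) : Int :=
  if year == 2020 then
    if month == 10 then 0
    else if month == 11 then 1
    else 2
  else 12 * max 0 (year - 2021) + max 0 month + 2

-- ===== PRECONDITION & SPEC =====
def Spec_findDate (month : Int) (day : Int) (year : Int) (out : Int) : Prop := out = findDate_alt month day year
instance (month : Int) (day : Int) (year : Int) (out : Int) : Decidable (Spec_findDate month day year out) := by unfold Spec_findDate; infer_instance

-- ===== CLAIM (what is proved, stated in full; the proofs are below) =====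
def Claim_equal_findDate : Prop := ∀ (month : Int) (day : Int) (year : Int), Dom_findDate month day year → Spec_findDate month day year (findDate month day year)

-- ===== LEMMAS AND PROOFS =====

theorem foldl_const_add (l : List Int) (c init : Int) :
    l.foldl (fun acc _ => acc + c) init = init + c * l.length := by
  induction l generalizing init with
  | nil => simp
  | cons x xs ih => simp [List.foldl, ih]; ring

theorem foldl_pyRange_const (n c init : Int) :
    (PySem.List.pyRange 0 n 1).foldl (fun acc _ => acc + c) init = init + c * max 0 n := by
  rw [foldl_const_add, PySem.List.length_pyRange_one]
  have : ((n - 0).toNat : Int) = max 0 n := by omega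
  rw [this]

-- ===== VERDICT (by name: the statement is the Claim_ definition above) =====
theorem findDate_spec : Claim_equal_findDate := by
  intro month day year _
  unfold Spec_findDate findDate findDate_alt
  simp only [foldl_pyRange_const]
  split_ifs <;> ring
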